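-- pv_equiv track=rewrite | github.com/jk-jung/problem-solving | codewars/6kyu/6_Upside down numbers.py | solve
-- ===== SOURCE A (Python) =====
-- def solve(a, b):
--     def f(x):
--         x = str(x)
--         y = x[::-1]
--         for a, b in zip(x, y):
--             s1 = '01869'
--             s2 = '01896'
--             a = s1.find(a)
--             b = s2.find(b)
--             if a == -1 or a != b:
--                 return False
--         return True
--
--     return sum(1 for x in range(a, b) if f(x))
-- ===== SOURCE B (Python) =====
-- PAIRS = [(0, 0), (1, 1), (8, 8), (6, 9), (9, 6)]
--
--
-- def _gen(L):
--     # values of all strobogrammatic digit-strings of length L (leading zeros allowed)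
--     if L == 0:
--         return [0]
--     if L == 1:
--         return [0, 1, 8]
--     half = 10 ** (L - 1)
--     return [p * half + 10 * v + q for v in _gen(L - 2) for p, q in PAIRS]
--
--
-- def solve(a, b):
--     if b <= 0:
--         return 0
--     count = 0
--     maxlen = len(str(b - 1))
--     for L in range(1, maxlen + 1):
--         lead = 10 ** (L - 1)
--         for v in _gen(L):
--             if (L == 1 or v >= lead) and a <= v < b:
--                 count += 1
--     return count
-- ===== Notes on version B (the rewrite author's own statement) =====
-- stated objective: faster
-- what changed: instead of scanning every integer in [a,b) and string-checking it, B recursively generates the values of all strobogrammatic digit-strings of each length (building pairs 00/11/88/69/96 around a middle) and counts the generated values that have no leading zero and fall in [a,b)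
import Mathlib
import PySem

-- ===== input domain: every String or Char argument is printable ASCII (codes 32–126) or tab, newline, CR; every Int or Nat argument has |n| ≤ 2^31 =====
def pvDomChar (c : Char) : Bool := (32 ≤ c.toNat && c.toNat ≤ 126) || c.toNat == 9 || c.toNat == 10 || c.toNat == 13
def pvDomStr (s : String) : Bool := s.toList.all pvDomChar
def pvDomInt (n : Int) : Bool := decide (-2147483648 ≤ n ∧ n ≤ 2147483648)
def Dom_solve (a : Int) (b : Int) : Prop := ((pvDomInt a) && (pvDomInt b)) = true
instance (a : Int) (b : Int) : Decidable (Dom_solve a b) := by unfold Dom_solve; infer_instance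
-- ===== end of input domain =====

-- B replaces A's per-integer scan of [a,b) by recursive generation of the values of all
-- strobogrammatic digit-strings of each length, counting the generated values in [a,b) (faster).


-- ===== PORT A =====
-- the `for a, b in zip(x, y): …` loop of f, with its early `return False`
def solveF_loop : List (Char × Char) → Bool
  | [] => true
  | (p, q) :: rest =>
      -- a = s1.find(a); b = s2.find(b); if a == -1 or a != b: return False
      if PySem.Chars.find ['0','1','8','6','9'] [p] = -1 ∨
         PySem.Chars.find ['0','1','8','6','9'] [p] ≠ PySem.Chars.find ['0','1','8','9','6'] [q]
      then false else solveF_loop rest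

-- inner f(x) (strings handled on the List Char side, as PySem prescribes)
def solveF (x : Int) : Bool :=
  let s := PySem.Int.toChars x                            -- x = str(x)
  let y := (PySem.List.slice? s none none (-1)).getD []   -- y = x[::-1] (step -1: never raises)
  solveF_loop (s.zip y)                                   -- for a, b in zip(x, y)

-- return sum(1 for x in range(a, b) if f(x))
def solve (a : Int) (b : Int) : Int :=
  (((PySem.List.pyRange a b 1).filter solveF).map (fun _ => (1 : Int))).sum

-- ===== PORT B =====
-- PAIRS = [(0,0),(1,1),(8,8),(6,9),(9,6)]
def pairsV : List (Int × Int) := [(0, 0), (1, 1), (8, 8), (6, 9), (9, 6)]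

-- _gen(L): values of all strobogrammatic digit-strings of length L (leading zeros allowed);
-- `10 ** (L - 1)` of the Python is 10^(L+1) here since the recursive call is at L, not L-2
def genV : Nat → List Int
  | 0 => [0]
  | 1 => [0, 1, 8]
  | (L + 2) => (genV L).flatMap (fun v => pairsV.map (fun pq => pq.1 * 10 ^ (L + 1) + 10 * v + pq.2))

-- solve(a, b): early return for b <= 0, then count generated values without leading zero in [a,b);
-- L runs over range(1, maxlen+1) so L ≥ 1 and `L.toNat` is exact
def solve_alt (a : Int) (b : Int) : Int :=
  if b ≤ 0 then 0
  else
    let maxlen := (PySem.Int.toChars (b - 1)).length      -- maxlen = len(str(b - 1))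
    (PySem.List.pyRange 1 ((maxlen : Int) + 1) 1).foldl (fun count L =>
      let lead : Int := 10 ^ (L.toNat - 1)                -- lead = 10 ** (L - 1)
      (genV L.toNat).foldl
        (fun c v => if (L = 1 ∨ lead ≤ v) ∧ a ≤ v ∧ v < b then c + 1 else c) count) 0

-- ===== PRECONDITION & SPEC =====
def Spec_solve (a : Int) (b : Int) (out : Int) : Prop := out = solve_alt a b
instance (a : Int) (b : Int) (out : Int) : Decidable (Spec_solve a b out) := by unfold Spec_solve; infer_instance

-- ===== CLAIM (what is proved, stated in full; the proofs are below) =====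
def Claim_equal_solve : Prop := ∀ (a : Int) (b : Int), Dom_solve a b → Spec_solve a b (solve a b)

-- ===== LEMMAS AND PROOFS =====

-- the upside-down image of a digit character, none if it has none (proof-side view of A's check)
def rotOpt (c : Char) : Option Char :=
  if c = '0' then some '0'
  else if c = '1' then some '1'
  else if c = '8' then some '8'
  else if c = '6' then some '9'
  else if c = '9' then some '6'
  else none

-- A's check of a digit string, as one boolean
def chk (s : List Char) : Bool := s.reverse.map rotOpt == s.map some

-- string-level mirror of genV: the strobogrammatic digit-strings of length L
def pairsC : List (Char × Char) := [('0','0'), ('1','1'), ('8','8'), ('6','9'), ('9','6')]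

def genS : Nat → List (List Char)
  | 0 => [[]]
  | 1 => [['0'], ['1'], ['8']]
  | (L + 2) => (genS L).flatMap (fun m => pairsC.map (fun pq => pq.1 :: m ++ [pq.2]))

def digitsOK : List Char := ['0','1','8','6','9']

def dv (c : Char) : Nat := c.toNat - 48

def valN (s : List Char) : Nat := s.foldl (fun a c => 10 * a + dv c) 0

-- ---------- stage 1: A's loop is `chk` ----------

theorem find_s1 (c : Char) : PySem.Chars.find ['0','1','8','6','9'] [c] =
    if c = '0' then 0 else if c = '1' then 1 else if c = '8' then 2 else if c = '6' then 3
    else if c = '9' then 4 else -1 := by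
  simp [PySem.Chars.find, PySem.Chars.find.go]

theorem find_s2 (c : Char) : PySem.Chars.find ['0','1','8','9','6'] [c] =
    if c = '0' then 0 else if c = '1' then 1 else if c = '8' then 2 else if c = '9' then 3
    else if c = '6' then 4 else -1 := by
  simp [PySem.Chars.find, PySem.Chars.find.go]

set_option maxHeartbeats 1000000 in
theorem loop_all (ps : List (Char × Char)) :
    solveF_loop ps = ps.all (fun pq => rotOpt pq.2 == some pq.1) := by
  induction ps with
  | nil => rfl
  | cons hd tl ih =>
    obtain ⟨p, q⟩ := hd
    rw [solveF_loop, List.all_cons, ih, find_s1, find_s2]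
    by_cases h0 : p = '0' <;> by_cases h1 : p = '1' <;> by_cases h8 : p = '8' <;>
      by_cases h6 : p = '6' <;> by_cases h9 : p = '9' <;>
      simp_all [rotOpt] <;>
      (by_cases g0 : q = '0' <;> by_cases g1 : q = '1' <;> by_cases g8 : q = '8' <;>
        by_cases g6 : q = '6' <;> by_cases g9 : q = '9' <;> simp_all) <;>
      (intro h; subst h; simp_all)

theorem all_zip_eq (cs : List Char) : ∀ ds : List Char, ds.length = cs.length →
    ((cs.zip ds).all (fun pq => rotOpt pq.2 == some pq.1)) = (ds.map rotOpt == cs.map some) := by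
  induction cs with
  | nil => intro ds h; simp at h; subst h; rfl
  | cons c cs ih =>
    intro ds h
    cases ds with
    | nil => simp at h
    | cons d ds =>
      simp only [List.zip_cons_cons, List.all_cons, List.map_cons] at *
      rw [ih ds (by simpa using h)]
      by_cases hd : rotOpt d = some c <;> simp [hd]

theorem f_eq_chk (x : Int) : solveF x = chk (PySem.Int.toChars x) := by
  show solveF_loop _ = _
  rw [PySem.List.slice?_none_none_neg_one, Option.getD_some, loop_all,
    all_zip_eq _ _ (by simp)]
  rfl

theorem rotOpt_ne_dash (q : Char) : rotOpt q ≠ some '-' := by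
  unfold rotOpt; split_ifs <;> simp_all

theorem chk_neg (x : Int) (hx : x < 0) : chk (PySem.Int.toChars x) = false := by
  unfold chk
  simp only [PySem.Int.toChars, if_pos hx]
  rw [beq_eq_false_iff_ne]
  intro heq
  have : some '-' ∈ (('-' :: Nat.toDigits 10 x.natAbs).reverse.map rotOpt) := by
    rw [heq]; simp
  obtain ⟨q, _, hq⟩ := List.mem_map.mp this
  exact rotOpt_ne_dash q hq

-- ---------- stage 2: genS basics ----------

theorem genS_length : ∀ (L : Nat), ∀ s ∈ genS L, s.length = L
  | 0 => by simp [genS]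
  | 1 => by simp [genS]
  | (L + 2) => by
    intro s hs
    simp only [genS, List.mem_flatMap, List.mem_map] at hs
    obtain ⟨m, hm, pq, hpq, rfl⟩ := hs
    have := genS_length L m hm
    simp [this]

theorem genS_chars : ∀ (L : Nat), ∀ s ∈ genS L, ∀ c ∈ s, c ∈ digitsOK
  | 0 => by simp [genS]
  | 1 => by intro s hs; fin_cases hs <;> simp [digitsOK]
  | (L + 2) => by
    intro s hs c hc
    simp only [genS, List.mem_flatMap, List.mem_map] at hs
    obtain ⟨m, hm, pq, hpq, rfl⟩ := hs
    have hmem := genS_chars L m hm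
    fin_cases hpq <;> simp_all [digitsOK] <;> rcases hc with h | h | h <;> simp_all

theorem pairsC_iff (p q : Char) :
    (p, q) ∈ pairsC ↔ (rotOpt q = some p ∧ rotOpt p = some q) := by
  constructor
  · intro h; fin_cases h <;> simp [rotOpt]
  · rintro ⟨h1, h2⟩
    unfold rotOpt at h1
    split_ifs at h1 <;> simp_all [pairsC, rotOpt] <;> exact h1.symm

theorem chk_iff_genS (s : List Char) : chk s = true ↔ s ∈ genS s.length := by
  induction s using List.bidirectionalRec with
  | nil => simp [chk, genS]
  | singleton a =>
    simp only [chk, List.reverse_singleton, List.map_cons, List.map_nil, List.length_singleton,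
      genS]
    constructor
    · intro h
      have : rotOpt a = some a := by simpa using h
      unfold rotOpt at this; split_ifs at this <;> simp_all
    · intro h
      simp only [List.mem_cons, List.cons.injEq, and_true, List.not_mem_nil, or_false] at h
      rcases h with h | h | h <;> subst h <;> simp [rotOpt]
  | cons_append a l b ih =>
    have hlen : (a :: (l ++ [b])).length = l.length + 2 := by simp
    rw [hlen]
    have hrev : (a :: (l ++ [b])).reverse = b :: (l.reverse ++ [a]) := by simp
    have lhs : chk (a :: (l ++ [b])) = true ↔
        (rotOpt b = some a ∧ chk l = true ∧ rotOpt a = some b) := by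
      unfold chk
      rw [hrev]
      simp only [List.map_cons, List.map_append, List.map_cons, List.map_nil, List.cons.injEq,
        beq_iff_eq]
      constructor
      · rintro ⟨h1, h2⟩
        have := List.append_inj h2 (by simp)
        refine ⟨h1, ?_, ?_⟩
        · simpa [chk] using this.1
        · simpa using this.2
      · rintro ⟨h1, h2, h3⟩
        refine ⟨h1, ?_⟩
        have h2' : l.reverse.map rotOpt = l.map some := by simpa [chk] using h2
        rw [h2', h3]
    rw [lhs]
    constructor
    · rintro ⟨h1, h2, h3⟩
      simp only [genS, List.mem_flatMap, List.mem_map]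
      refine ⟨l, ih.mp h2, (a, b), (pairsC_iff a b).mpr ⟨h1, h3⟩, by simp⟩
    · intro h
      simp only [genS, List.mem_flatMap, List.mem_map] at h
      obtain ⟨m, hm, pq, hpq, heq⟩ := h
      have hml : m.length = l.length := genS_length l.length m hm
      obtain ⟨h1, h2⟩ : pq.1 = a ∧ m ++ [pq.2] = l ++ [b] := by
        refine ⟨?_, ?_⟩ <;> injection heq with ha hb
      obtain ⟨h3, h4⟩ := List.append_inj h2 hml
      have hb : pq.2 = b := by simpa using h4
      have hrot := (pairsC_iff pq.1 pq.2).mp hpq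
      rw [h1, hb] at hrot
      subst h3
      exact ⟨hrot.1, ih.mpr hm, hrot.2⟩

theorem valA_eq (s : List Char) : ∀ (a : Nat),
    s.foldl (fun x c => 10 * x + dv c) a = a * 10 ^ s.length + valN s := by
  induction s with
  | nil => intro a; simp [valN]
  | cons c s ih =>
    intro a
    simp only [List.foldl_cons, List.length_cons]
    rw [ih]
    have : valN (c :: s) = dv c * 10 ^ s.length + valN s := by
      show List.foldl _ (10 * 0 + dv c) s = _
      rw [ih]; ring
    rw [this]; ring

theorem valN_cons (c : Char) (s : List Char) :
    valN (c :: s) = dv c * 10 ^ s.length + valN s := by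
  show List.foldl _ (10 * 0 + dv c) s = _
  rw [valA_eq]; ring_nf

theorem valN_append_singleton (s : List Char) (d : Char) :
    valN (s ++ [d]) = 10 * valN s + dv d := by
  unfold valN
  rw [List.foldl_append]
  rfl

theorem dv_lt (c : Char) (h : c ∈ digitsOK) : dv c < 10 := by
  fin_cases h <;> decide

theorem valN_lt (s : List Char) (h : ∀ c ∈ s, c ∈ digitsOK) : valN s < 10 ^ s.length := by
  induction s with
  | nil => decide
  | cons c s ih =>
    rw [valN_cons]
    have h1 := dv_lt c (h c (by simp))
    have h2 := ih (fun x hx => h x (by simp [hx]))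
    have h3 : dv c * 10 ^ s.length ≤ 9 * 10 ^ s.length :=
      Nat.mul_le_mul_right _ (by omega)
    calc dv c * 10 ^ s.length + valN s < dv c * 10 ^ s.length + 10 ^ s.length := by omega
      _ ≤ 9 * 10 ^ s.length + 10 ^ s.length := by omega
      _ = 10 ^ (s.length + 1) := by ring

theorem genV_eq_map : ∀ (L : Nat), genV L = (genS L).map (fun s => (valN s : Int))
  | 0 => by decide
  | 1 => by decide
  | (L + 2) => by
    rw [genV, genS, genV_eq_map L, List.map_flatMap, List.flatMap_map]
    apply List.flatMap_congr
    intro m hm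
    have hlen : m.length = L := genS_length L m hm
    have key : ∀ p q : Char, (p, q) ∈ pairsC →
        (valN (p :: m ++ [q]) : Int) = (dv p : Int) * 10 ^ (L + 1) + 10 * (valN m : Int) + (dv q : Int) := by
      intro p q _
      have : valN (p :: (m ++ [q])) = dv p * 10 ^ (m ++ [q]).length + valN (m ++ [q]) := valN_cons _ _
      rw [List.cons_append, this, valN_append_singleton]
      push_cast
      simp [hlen]
      ring
    simp only [pairsC, pairsV, List.map_cons, List.map_nil]
    rw [key '0' '0' (by decide), key '1' '1' (by decide), key '8' '8' (by decide),
      key '6' '9' (by decide), key '9' '6' (by decide)]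
    have e1 : ('1'.toNat - 48 : Nat) = 1 := by decide
    have e8 : ('8'.toNat - 48 : Nat) = 8 := by decide
    have e6 : ('6'.toNat - 48 : Nat) = 6 := by decide
    have e9 : ('9'.toNat - 48 : Nat) = 9 := by decide
    norm_num [dv, e1, e8, e6, e9]

theorem toDigitsCore_eq : ∀ (fuel n : Nat) (ds : List Char), n < fuel →
    Nat.toDigitsCore 10 fuel n ds =
      (if n = 0 then ['0'] else (Nat.digits 10 n).reverse.map Nat.digitChar) ++ ds
  | 0, n, ds, h => by omega
  | (fuel + 1), n, ds, h => by
    rw [Nat.toDigitsCore]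
    by_cases h0 : n / 10 = 0
    · simp only [h0]
      by_cases hn : n = 0
      · subst hn; simp [Nat.digitChar]
      · have hlt : n < 10 := by omega
        rw [if_neg hn, Nat.digits_def' (by norm_num) (by omega), Nat.mod_eq_of_lt hlt, h0]
        simp [Nat.digitChar]
    · rw [if_neg h0]
      have hrec : n / 10 < fuel := by omega
      have hn : n ≠ 0 := by omega
      rw [toDigitsCore_eq fuel (n / 10) _ hrec, if_neg h0, if_neg hn]
      conv_rhs => rw [Nat.digits_def' (b := 10) (by norm_num) (n := n) (by omega)]
      simp

theorem toDigits_eq (n : Nat) :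
    Nat.toDigits 10 n = if n = 0 then ['0'] else (Nat.digits 10 n).reverse.map Nat.digitChar := by
  rw [Nat.toDigits, toDigitsCore_eq (n+1) n [] (by omega)]
  simp
  
theorem dv_digitChar (d : Nat) (h : d < 10) : dv (Nat.digitChar d) = d := by
  interval_cases d <;> decide


theorem valN_rev_map_digitChar (l : List Nat) (h : ∀ d ∈ l, d < 10) :
    valN (l.reverse.map Nat.digitChar) = Nat.ofDigits 10 l := by
  induction l with
  | nil => decide
  | cons d t ih =>
    simp only [List.reverse_cons, List.map_append, List.map_cons, List.map_nil]
    rw [valN_append_singleton, ih (fun x hx => h x (by simp [hx])), Nat.ofDigits_cons,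
      dv_digitChar d (h d (by simp))]
    omega

theorem valN_toDigits (n : Nat) : valN (Nat.toDigits 10 n) = n := by
  rw [toDigits_eq]
  by_cases hn : n = 0
  · subst hn; decide
  · rw [if_neg hn, valN_rev_map_digitChar _ (fun d hd => Nat.digits_lt_base (by norm_num) hd),
      Nat.ofDigits_digits]

theorem dv_ne_zero (c : Char) (hc : c ∈ digitsOK) (h : c ≠ '0') : dv c ≠ 0 := by
  fin_cases hc <;> simp_all <;> decide

theorem digitChar_dv (c : Char) (hc : c ∈ digitsOK) : Nat.digitChar (dv c) = c := by
  fin_cases hc <;> decide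

theorem toDigits_valN (s : List Char) (hne : s ≠ []) (hd : ∀ c ∈ s, c ∈ digitsOK)
    (hh : s.headI ≠ '0' ∨ s = ['0']) : Nat.toDigits 10 (valN s) = s := by
  rcases hh with hh | rfl
  · -- no leading zero
    have hvd : valN s = Nat.ofDigits 10 (s.reverse.map dv) := by
      have := valN_rev_map_digitChar (s.reverse.map dv)
        (fun d hdm => by
          obtain ⟨c, hc, rfl⟩ := List.mem_map.mp hdm
          exact dv_lt c (hd c (by simpa using hc)))
      rw [← this]
      congr 1
      simp only [List.map_reverse, List.reverse_reverse, List.map_map]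
      conv_lhs => rw [← List.map_id s]
      exact (List.map_congr_left (fun c hc => (digitChar_dv c (hd c hc)).symm))
    have hdig : Nat.digits 10 (valN s) = s.reverse.map dv := by
      rw [hvd]
      apply Nat.digits_ofDigits 10 (by norm_num)
      · intro d hdm
        obtain ⟨c, hc, rfl⟩ := List.mem_map.mp hdm
        exact dv_lt c (hd c (by simpa using hc))
      · intro hne'
        rw [List.getLast_map, List.getLast_reverse]
        exact dv_ne_zero _ (hd _ (List.head_mem _)) (by
          cases s with
          | nil => exact absurd rfl hne
          | cons c t => simpa using hh)
    have hv0 : valN s ≠ 0 := by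
      intro h0
      rw [h0] at hdig
      simp only [Nat.digits_zero] at hdig
      have : s.reverse.map dv ≠ [] := by
        rw [Ne, List.map_eq_nil_iff, List.reverse_eq_nil_iff]
        exact hne
      exact this hdig.symm
    rw [toDigits_eq, if_neg hv0, hdig]
    simp only [List.map_reverse, List.reverse_reverse, List.map_map]
    conv_rhs => rw [← List.map_id s]
    exact List.map_congr_left (fun c hc => digitChar_dv c (hd c hc))
  · decide

theorem toDigits_ne_nil (n : Nat) : Nat.toDigits 10 n ≠ [] := by
  rw [toDigits_eq]
  by_cases hn : n = 0
  · simp [hn]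
  · simp only [if_neg hn]
    rw [Ne, List.map_eq_nil_iff, List.reverse_eq_nil_iff]
    exact Nat.digits_ne_nil_iff_ne_zero.mpr hn

theorem toDigits_len_le (n m : Nat) (h : n ≤ m) :
    (Nat.toDigits 10 n).length ≤ (Nat.toDigits 10 m).length := by
  rw [toDigits_eq, toDigits_eq]
  by_cases hn : n = 0
  · by_cases hm : m = 0
    · simp [hn, hm]
    · simp only [if_pos hn, if_neg hm, List.length_map, List.length_reverse, List.length_singleton]
      have h1 : Nat.digits 10 m ≠ [] := Nat.digits_ne_nil_iff_ne_zero.mpr hm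
      have : (Nat.digits 10 m).length ≠ 0 := by simpa using h1
      omega
  · have hm : m ≠ 0 := by omega
    simp only [if_neg hn, if_neg hm, List.length_map, List.length_reverse]
    exact Nat.le_length_digits_le 10 n m h

theorem toChars_nonneg (x : Int) (hx : 0 ≤ x) :
    PySem.Int.toChars x = Nat.toDigits 10 x.toNat := by
  simp [PySem.Int.toChars, not_lt.mpr hx]

theorem genV_bounds (L : Nat) (v : Int) (hv : v ∈ genV L) : 0 ≤ v ∧ v < 10 ^ L := by
  rw [genV_eq_map] at hv
  obtain ⟨s, hs, rfl⟩ := List.mem_map.mp hv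
  have h1 := valN_lt s (genS_chars L s hs)
  rw [genS_length L s hs] at h1
  constructor
  · positivity
  · exact_mod_cast h1

theorem main_fwd (x : Int) (hx : 0 ≤ x) (hchk : chk (PySem.Int.toChars x) = true) :
    x ∈ genV (Nat.toDigits 10 x.toNat).length ∧
      ((Nat.toDigits 10 x.toNat).length = 1 ∨
        (10 : Int) ^ ((Nat.toDigits 10 x.toNat).length - 1) ≤ x) := by
  rw [toChars_nonneg x hx] at hchk
  set n := x.toNat with hn
  set s := Nat.toDigits 10 n with hs
  have hmem : s ∈ genS s.length := (chk_iff_genS s).mp hchk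
  have hval : (valN s : Int) = x := by rw [valN_toDigits]; omega
  constructor
  · rw [genV_eq_map]
    exact List.mem_map.mpr ⟨s, hmem, hval⟩
  · by_cases h0 : n = 0
    · left; rw [hs, h0]; rfl
    · right
      have hlen : s.length = (Nat.digits 10 n).length := by
        rw [hs, toDigits_eq, if_neg h0]; simp
      have hpos : 0 < (Nat.digits 10 n).length := by
        have hd : Nat.digits 10 n ≠ [] := Nat.digits_ne_nil_iff_ne_zero.mpr h0
        cases h : Nat.digits 10 n with
        | nil => exact absurd h hd
        | cons a t => simp
      have := (Nat.lt_digits_length_iff (b := 10) (by norm_num) n).mp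
        (show (Nat.digits 10 n).length - 1 < (Nat.digits 10 n).length by omega)
      rw [hlen]
      have : ((10:Nat) ^ ((Nat.digits 10 n).length - 1) : Int) ≤ (n : Int) := by exact_mod_cast this
      push_cast at this ⊢
      omega

theorem main_bwd (L : Nat) (x : Int) (hm : x ∈ genV L)
    (hlead : L = 1 ∨ (10 : Int) ^ (L - 1) ≤ x) :
    0 ≤ x ∧ chk (PySem.Int.toChars x) = true ∧ (Nat.toDigits 10 x.toNat).length = L := by
  rw [genV_eq_map] at hm
  obtain ⟨s, hs, rfl⟩ := List.mem_map.mp hm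
  have hlen : s.length = L := genS_length L s hs
  have hchars := genS_chars L s hs
  have key : Nat.toDigits 10 (valN s) = s := by
    rcases hlead with rfl | hlead
    · rw [show genS 1 = [['0'], ['1'], ['8']] from rfl] at hs
      fin_cases hs <;> decide
    · have hpow : (1 : Int) ≤ (10 : Int) ^ (L - 1) := one_le_pow₀ (by norm_num)
      have hne : s ≠ [] := by
        intro h
        rw [h] at hlead
        simp only [valN, List.foldl_nil, Nat.cast_zero] at hlead
        linarith
      obtain ⟨c, t, rfl⟩ := List.exists_cons_of_ne_nil hne
      have hh : c ≠ '0' := by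
        intro hc
        subst hc
        have h1 : valN ('0' :: t) = valN t := by
          rw [valN_cons]; simp [dv]
        have h2 : valN t < 10 ^ t.length := valN_lt t (fun x hx => hchars x (by simp [hx]))
        have h3 : t.length = L - 1 := by simp at hlen; omega
        rw [h1] at hlead
        have : ((10:Nat) ^ (L-1) : Int) = (10:Int) ^ (L-1) := by push_cast; ring
        rw [← this] at hlead
        have h4 : (10:Nat) ^ (L - 1) ≤ valN t := by exact_mod_cast hlead
        rw [h3] at h2
        omega
      exact toDigits_valN _ hne hchars (Or.inl (by simpa using hh))
  have hnat : (valN s : Int).toNat = valN s := by simp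
  refine ⟨by positivity, ?_, ?_⟩
  · rw [toChars_nonneg _ (by positivity), hnat, key]
    exact (chk_iff_genS s).mpr (by rw [hlen]; exact hs)
  · rw [hnat, key, hlen]

theorem dv_inj (c c' : Char) (h : c ∈ digitsOK) (h' : c' ∈ digitsOK) (he : dv c = dv c') :
    c = c' := by
  fin_cases h <;> fin_cases h' <;> first | rfl | (exfalso; revert he; decide)

theorem valN_inj : ∀ (s t : List Char), (∀ c ∈ s, c ∈ digitsOK) → (∀ c ∈ t, c ∈ digitsOK) →
    s.length = t.length → valN s = valN t → s = t := by
  intro s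
  induction s with
  | nil => intro t _ _ hl _; cases t <;> simp_all
  | cons c s ih =>
    intro t hs ht hl hv
    cases t with
    | nil => simp at hl
    | cons d t =>
      have hlen : s.length = t.length := by simpa using hl
      rw [valN_cons, valN_cons, hlen] at hv
      have hbs : valN s < 10 ^ t.length := by
        rw [← hlen]; exact valN_lt s (fun x hx => hs x (by simp [hx]))
      have hbt : valN t < 10 ^ t.length := valN_lt t (fun x hx => ht x (by simp [hx]))
      have hcd : dv c = dv d := by
        by_contra hne
        rcases Nat.lt_or_ge (dv c) (dv d) with hlt | hge
        · have : (dv c + 1) * 10 ^ t.length ≤ dv d * 10 ^ t.length :=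
            Nat.mul_le_mul_right _ (by omega)
          nlinarith
        · have hlt : dv d < dv c := by omega
          have : (dv d + 1) * 10 ^ t.length ≤ dv c * 10 ^ t.length :=
            Nat.mul_le_mul_right _ (by omega)
          nlinarith
      have hst : valN s = valN t := by
        have := hcd ▸ hv
        omega
      rw [dv_inj c d (hs c (by simp)) (ht d (by simp)) hcd,
        ih t (fun x hx => hs x (by simp [hx])) (fun x hx => ht x (by simp [hx])) hlen hst]

theorem genS_nodup : ∀ (L : Nat), (genS L).Nodup
  | 0 => by decide
  | 1 => by decide
  | (L + 2) => by
    rw [genS, List.nodup_flatMap]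
    constructor
    · intro m _
      apply List.Nodup.map_on
      · intro pq hpq pq' hpq' he
        have h1 : pq.1 = pq'.1 := by injection he
        have h2 : m ++ [pq.2] = m ++ [pq'.2] := by injection he
        have h3 : pq.2 = pq'.2 := by simpa using h2
        exact Prod.ext h1 h3
      · decide
    · have hnd := genS_nodup L
      refine hnd.imp_of_mem ?_
      intro m m' hm hm' hne s hsm hsm'
      obtain ⟨pq, _, rfl⟩ := List.mem_map.mp hsm
      obtain ⟨pq', _, heq⟩ := List.mem_map.mp hsm'
      have hlen : m'.length = m.length := by
        rw [genS_length L m hm, genS_length L m' hm']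
      have h2 : m' ++ [pq'.2] = m ++ [pq.2] := by injection heq
      exact hne (List.append_inj h2 hlen).1.symm

theorem genV_nodup (L : Nat) : (genV L).Nodup := by
  rw [genV_eq_map]
  apply List.Nodup.map_on
  · intro s hs s' hs' he
    exact valN_inj s s' (genS_chars L s hs) (genS_chars L s' hs')
      (by rw [genS_length L s hs, genS_length L s' hs'])
      (by exact_mod_cast he)
  · exact genS_nodup L

def chunk (a b : Int) (L : Int) : List Int :=
  (genV L.toNat).filter (fun v => decide ((L = 1 ∨ (10:Int) ^ (L.toNat - 1) ≤ v) ∧ a ≤ v ∧ v < b))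

theorem solve_eq_filter (a b : Int) :
    solve a b = (((PySem.List.pyRange a b 1).filter solveF).length : Int) := by
  unfold solve
  rw [PySem.List.sum_map_const_int]
  ring

theorem sum_map_natCast (l : List Int) (f : Int → Nat) :
    (l.map (fun x => ((f x : Nat) : Int))).sum = (((l.map f).sum : Nat) : Int) := by
  induction l with
  | nil => simp
  | cons x l ih => simp [ih]

theorem solve_alt_eq_chunks (a b : Int) (hb : 0 < b) :
    solve_alt a b =
      (((PySem.List.pyRange 1 (((PySem.Int.toChars (b-1)).length : Int) + 1) 1).flatMap
        (chunk a b)).length : Int) := by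
  unfold solve_alt
  rw [if_neg (by omega)]
  have hfun : (fun (count L : Int) =>
      (genV L.toNat).foldl
        (fun c v => if (L = 1 ∨ (10:Int) ^ (L.toNat - 1) ≤ v) ∧ a ≤ v ∧ v < b then c + 1 else c)
        count) =
      (fun (count L : Int) => count + (((chunk a b L).length : Nat) : Int)) := by
    funext count L
    rw [PySem.List.foldl_ite_add_one]
    congr 1
    rw [chunk, List.countP_eq_length_filter]
  rw [hfun, PySem.List.foldl_add, List.length_flatMap, sum_map_natCast]
  simp

theorem perm_chunks (a b : Int) (hb : 0 < b) :
    ((PySem.List.pyRange a b 1).filter solveF).Perm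
      ((PySem.List.pyRange 1 (((PySem.Int.toChars (b-1)).length : Int) + 1) 1).flatMap
        (chunk a b)) := by
  set maxlen := (PySem.Int.toChars (b-1)).length with hml
  have hmlv : maxlen = (Nat.toDigits 10 (b-1).toNat).length := by
    rw [hml, toChars_nonneg _ (by omega)]
  apply (List.perm_ext_iff_of_nodup ?_ ?_).mpr
  · -- membership
    intro x
    rw [List.mem_filter, List.mem_flatMap]
    constructor
    · rintro ⟨hxr, hxf⟩
      obtain ⟨hxa, hxb⟩ := PySem.List.mem_pyRange_one.mp hxr
      rw [f_eq_chk] at hxf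
      have hx0 : 0 ≤ x := by
        by_contra h
        rw [chk_neg x (by omega)] at hxf
        exact absurd hxf (by simp)
      obtain ⟨hmem, hlead⟩ := main_fwd x hx0 hxf
      set Lx := (Nat.toDigits 10 x.toNat).length with hLx
      have hL1 : 1 ≤ Lx := by
        have := toDigits_ne_nil x.toNat
        cases h : Nat.toDigits 10 x.toNat with
        | nil => exact absurd h this
        | cons c t => rw [hLx, h]; simp
      refine ⟨(Lx : Int), ?_, ?_⟩
      · rw [PySem.List.mem_pyRange_one]
        constructor
        · exact_mod_cast hL1
        · have : Lx ≤ maxlen := by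
            rw [hmlv, hLx]
            exact toDigits_len_le _ _ (by omega)
          exact_mod_cast Nat.lt_succ_of_le this
      · rw [chunk, List.mem_filter]
        refine ⟨by simpa using hmem, ?_⟩
        simp only [decide_eq_true_eq]
        refine ⟨?_, hxa, hxb⟩
        rcases hlead with h | h
        · left; exact_mod_cast h
        · right; simpa using h
    · rintro ⟨L, hLr, hxc⟩
      obtain ⟨hL1, hLm⟩ := PySem.List.mem_pyRange_one.mp hLr
      rw [chunk, List.mem_filter] at hxc
      obtain ⟨hmem, hcond⟩ := hxc
      simp only [decide_eq_true_eq] at hcond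
      obtain ⟨hlead, hxa, hxb⟩ := hcond
      have hbwd := main_bwd L.toNat x hmem (by
        rcases hlead with h | h
        · left; omega
        · right; exact h)
      refine ⟨PySem.List.mem_pyRange_one.mpr ⟨hxa, hxb⟩, ?_⟩
      rw [f_eq_chk]
      exact hbwd.2.1
  · exact (PySem.List.nodup_pyRange_one a b).filter _
  · rw [List.nodup_flatMap]
    constructor
    · intro L _
      exact (genV_nodup L.toNat).filter _
    · have := PySem.List.pairwise_lt_pyRange_one 1 ((maxlen : Int) + 1)
      refine this.imp_of_mem ?_
      intro L L' hL hL' hlt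
      have h1 : 1 ≤ L := (PySem.List.mem_pyRange_one.mp hL).1
      intro v hv hv'
      rw [chunk, List.mem_filter] at hv hv'
      obtain ⟨hm, hc⟩ := hv
      obtain ⟨hm', hc'⟩ := hv'
      simp only [decide_eq_true_eq] at hc hc'
      have hub : v < 10 ^ L.toNat := (genV_bounds _ _ hm).2
      have hL'2 : (2 : Int) ≤ L' := by omega
      have hlb : (10:Int) ^ (L'.toNat - 1) ≤ v := by
        rcases hc'.1 with h | h
        · omega
        · exact h
      have hpow : (10:Int) ^ L.toNat ≤ (10:Int) ^ (L'.toNat - 1) := by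
        apply pow_le_pow_right₀ (by norm_num)
        omega
      omega


-- ===== VERDICT (by name: the statement is the Claim_ definition above) =====
theorem solve_spec : Claim_equal_solve := by
  intro a b _
  unfold Spec_solve
  by_cases hb : 0 < b
  · rw [solve_eq_filter, solve_alt_eq_chunks a b hb, (perm_chunks a b hb).length_eq]
  · have hb' : b ≤ 0 := by omega
    rw [solve_eq_filter]
    have : (PySem.List.pyRange a b 1).filter solveF = [] := by
      rw [List.filter_eq_nil_iff]
      intro x hx
      have hxb := (PySem.List.mem_pyRange_one.mp hx).2
      simp [f_eq_chk, chk_neg x (by omega)]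
    rw [this]
    simp [solve_alt, hb']
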